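-- pv_equiv track=rewrite | github.com/sharjeel6392/Classification-of-language | dataParsing.py | letterPairs
-- ===== SOURCE A (Python) =====
-- def letterPairs(line):
--
-- 	count = 0
-- 	for i in range(len(line)-1):
-- 		char = line[i]
-- 		nextChar = line[i+1]
--
-- 		if char == nextChar:
-- 			count += 1
-- 	if count > 3:
-- 		return 0
-- 	else:
-- 		return 1
-- ===== SOURCE B (Python) =====
-- from itertools import groupby
--
--
-- def letterPairs(line):
--     # number of maximal runs of equal adjacent characters
--     num_runs = sum(1 for _ in groupby(line))
--     # adjacent equal pairs = length - number of runs
--     count = len(line) - num_runs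
--     return 0 if count > 3 else 1
-- ===== Notes on version B (the rewrite author's own statement) =====
-- stated objective: simpler
-- what changed: Replaces the per-index adjacent comparison loop with run-length grouping (itertools.groupby) and the identity pairs = len(line) - number_of_runs.
import Mathlib
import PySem

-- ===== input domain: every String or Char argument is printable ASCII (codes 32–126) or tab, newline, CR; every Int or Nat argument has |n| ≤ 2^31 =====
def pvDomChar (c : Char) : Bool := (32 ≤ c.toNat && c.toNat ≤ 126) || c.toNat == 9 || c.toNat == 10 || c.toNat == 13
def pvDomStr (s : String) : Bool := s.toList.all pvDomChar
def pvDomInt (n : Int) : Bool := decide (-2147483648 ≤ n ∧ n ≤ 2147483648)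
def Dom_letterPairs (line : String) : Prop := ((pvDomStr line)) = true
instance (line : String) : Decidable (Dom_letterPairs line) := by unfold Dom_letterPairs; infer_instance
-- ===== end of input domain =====

-- B replaces A's per-index adjacent-comparison loop by run-length grouping plus the
-- identity pairs = length - number_of_runs (objective: simpler decomposition).

-- ===== PORT A =====
-- literal port of A: loop i over range(len(line)-1), compare line[i] with line[i+1];
-- the pyGetD default ' ' is never used (both indices are always in range).
def letterPairs (line : String) : Int :=
  let cs := line.toList
  let count := (PySem.List.pyRange 0 ((cs.length : Int) - 1) 1).foldl
    (fun count i =>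
      let char := PySem.List.pyGetD cs i ' '
      let nextChar := PySem.List.pyGetD cs (i + 1) ' '
      if char == nextChar then count + 1 else count) (0 : Int)
  if count > 3 then 0 else 1

-- ===== PORT B =====
-- sum(1 for _ in groupby(line)): number of maximal runs of equal adjacent characters
def pvRuns : List Char → Int
  | [] => 0
  | [_] => 1
  | a :: b :: t => (if a == b then 0 else 1) + pvRuns (b :: t)

def letterPairs_alt (line : String) : Int :=
  let cs := line.toList
  let numRuns := pvRuns cs
  let count := (cs.length : Int) - numRuns
  if count > 3 then 0 else 1

-- ===== PRECONDITION & SPEC =====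
def Spec_letterPairs (line : String) (out : Int) : Prop := out = letterPairs_alt line
instance (line : String) (out : Int) : Decidable (Spec_letterPairs line out) := by unfold Spec_letterPairs; infer_instance

-- ===== CLAIM (what is proved, stated in full; the proofs are below) =====
def Claim_equal_letterPairs : Prop := ∀ (line : String), Dom_letterPairs line → Spec_letterPairs line (letterPairs line)

-- ===== LEMMAS AND PROOFS =====

-- Nat-level count of adjacent equal pairs, as A's loop computes it
def pvPairs (cs : List Char) : Nat :=
  (List.range (cs.length - 1)).countP (fun k => cs.getD k ' ' == cs.getD (k + 1) ' ')

theorem pvPairs_cons_cons (a b : Char) (t : List Char) :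
    pvPairs (a :: b :: t) = (if a == b then 1 else 0) + pvPairs (b :: t) := by
  simp only [pvPairs, List.length_cons]
  have h2 : a :: b :: t = a :: (b :: t) := rfl
  have : t.length + 1 + 1 - 1 = t.length + 1 := by omega
  rw [this, List.range_succ_eq_map, List.countP_cons]
  simp only [List.countP_map, List.getD_cons_zero, List.getD_cons_succ]
  have : t.length + 1 - 1 = t.length := by omega
  rw [this]
  by_cases h : a == b <;> simp [h, Function.comp_def, Nat.add_comm]

theorem pvPairs_eq (cs : List Char) :
    (pvPairs cs : Int) = (cs.length : Int) - pvRuns cs := by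
  induction cs with
  | nil => simp [pvPairs, pvRuns]
  | cons a t ih =>
    cases t with
    | nil => simp [pvPairs, pvRuns]
    | cons b t' =>
      rw [pvPairs_cons_cons]
      simp only [pvRuns, List.length_cons] at ih ⊢
      by_cases h : a == b <;> simp only [h, if_true] <;> push_cast <;> omega

theorem letterPairs_count (cs : List Char) :
    (PySem.List.pyRange 0 ((cs.length : Int) - 1) 1).foldl
      (fun count i =>
        if PySem.List.pyGetD cs i ' ' == PySem.List.pyGetD cs (i + 1) ' '
        then count + 1 else count) (0 : Int)
    = (cs.length : Int) - pvRuns cs := by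
  rw [PySem.List.foldl_count_if
    (fun i => PySem.List.pyGetD cs i ' ' == PySem.List.pyGetD cs (i + 1) ' ')]
  rw [← pvPairs_eq]
  cases cs with
  | nil => simp [pvPairs, PySem.List.pyRange]
  | cons a t =>
    have hlen : ((a :: t).length : Int) - 1 = ((t.length : Nat) : Int) := by
      simp
    rw [hlen, PySem.List.pyRange_zero_natCast, List.countP_map]
    simp only [pvPairs, List.length_cons, Nat.add_sub_cancel, Int.zero_add]
    congr 1
    apply List.countP_congr
    intro k _
    have h1 : ((k : Int)) + 1 = ((k + 1 : Nat) : Int) := by push_cast; ring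
    simp only [Function.comp_def]
    rw [h1, PySem.List.pyGetD_natCast, PySem.List.pyGetD_natCast]

-- ===== VERDICT (by name: the statement is the Claim_ definition above) =====
theorem letterPairs_spec : Claim_equal_letterPairs := by
  intro line _
  show letterPairs line = letterPairs_alt line
  simp only [letterPairs, letterPairs_alt]
  rw [letterPairs_count]
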